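-- pv_equiv track=rewrite | github.com/sophievincoff/protparser | src/protparser/utils/mmcif/seq_build.py | build_resolved_index_map
-- ===== SOURCE A (Python) =====
-- from typing import Dict, Set, Any
--
-- def build_resolved_index_map(L: int, resolved_positions: Set[int]) -> Dict[int, int]:
--     """
--     Map canonical 1-indexed position -> resolved_only 1-indexed position,
--     for positions that are resolved.
--     """
--     m: Dict[int, int] = {}
--     j = 0
--     for i in range(1, L + 1):
--         if i in resolved_positions:
--             j += 1
--             m[i] = j
--     return m
-- ===== SOURCE B (Python) =====
-- def build_resolved_index_map(L, resolved_positions):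
--     ps = sorted(p for p in resolved_positions if 1 <= p <= L)
--     return {p: j for j, p in enumerate(ps, start=1)}
-- ===== Notes on version B (the rewrite author's own statement) =====
-- stated objective: alternative
-- what changed: Instead of scanning every canonical position 1..L and testing set membership, B sorts the resolved positions that fall in [1,L] and assigns indices by enumeration; cost moves from O(L) to O(k log k) in the number k of resolved positions, which is not faster when k is close to L.
import Mathlib
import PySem

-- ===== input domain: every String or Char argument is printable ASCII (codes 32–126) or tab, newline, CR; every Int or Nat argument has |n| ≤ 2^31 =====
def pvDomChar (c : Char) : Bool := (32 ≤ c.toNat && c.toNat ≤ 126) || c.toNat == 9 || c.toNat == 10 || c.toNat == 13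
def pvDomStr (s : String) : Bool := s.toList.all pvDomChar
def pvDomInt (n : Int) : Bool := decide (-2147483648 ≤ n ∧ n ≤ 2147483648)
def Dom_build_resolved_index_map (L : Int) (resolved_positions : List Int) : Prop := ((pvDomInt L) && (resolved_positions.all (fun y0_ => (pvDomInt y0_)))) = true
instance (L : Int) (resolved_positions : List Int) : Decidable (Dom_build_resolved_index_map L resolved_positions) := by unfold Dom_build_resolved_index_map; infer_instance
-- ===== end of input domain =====

-- B builds the map by sorting and enumerating the resolved positions inside [1,L] instead of
-- scanning all canonical positions 1..L; a different traversal, not measured faster.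
-- The set parameter arrives as a duplicate-free list (set convention, stated in Pre_).

-- ===== PORT A =====
-- for i in range(1, L+1): if i in resolved: j += 1; m[i] = j
def build_resolved_index_map (L : Int) (resolved_positions : List Int) : List (Int × Int) :=
  let r := (PySem.List.pyRange 1 (L + 1) 1).foldl
    (fun (st : Int × PySem.Dict Int Int) i =>
      if resolved_positions.contains i then (st.1 + 1, st.2.insert i (st.1 + 1)) else st)
    (0, PySem.Dict.empty)
  r.2.items

-- ===== PORT B =====
-- ps = sorted(p for p in resolved_positions if 1 <= p <= L); {p: j for j, p in enumerate(ps, 1)}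
def build_resolved_index_map_alt (L : Int) (resolved_positions : List Int) : List (Int × Int) :=
  let ps := PySem.List.sorted (resolved_positions.filter (fun p => decide (1 ≤ p ∧ p ≤ L))) (fun x => x) false
  (PySem.List.enumerate ps 1).map (fun jp => (jp.2, jp.1))

-- ===== PRECONDITION & SPEC =====
-- Pre_: the Python parameter is a set, so its list encoding holds distinct elements.
def Pre_build_resolved_index_map (L : Int) (resolved_positions : List Int) : Prop :=
  resolved_positions.Nodup
instance (L : Int) (resolved_positions : List Int) : Decidable (Pre_build_resolved_index_map L resolved_positions) := by unfold Pre_build_resolved_index_map; infer_instance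
def pvWitness_build_resolved_index_map : Int × List Int := (5, [2, 4, 9])

def Spec_build_resolved_index_map (L : Int) (resolved_positions : List Int) (out : List (Int × Int)) : Prop := out = build_resolved_index_map_alt L resolved_positions
instance (L : Int) (resolved_positions : List Int) (out : List (Int × Int)) : Decidable (Spec_build_resolved_index_map L resolved_positions out) := by unfold Spec_build_resolved_index_map; infer_instance

-- ===== CLAIM (what is proved, stated in full; the proofs are below) =====
def Claim_equal_build_resolved_index_map : Prop := ∀ (L : Int) (resolved_positions : List Int), Dom_build_resolved_index_map L resolved_positions → Pre_build_resolved_index_map L resolved_positions → Spec_build_resolved_index_map L resolved_positions (build_resolved_index_map L resolved_positions)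

-- ===== LEMMAS AND PROOFS =====

-- Invariant of A's loop: over a nodup list whose elements are fresh for d, the fold appends
-- the enumerated filtered elements to d.items and advances the counter by their number.
theorem loopA_invariant (res : List Int) :
    ∀ (l : List Int) (j : Int) (d : PySem.Dict Int Int), l.Nodup →
      (∀ i ∈ l, d.contains i = false) →
      (l.foldl (fun (st : Int × PySem.Dict Int Int) i =>
          if res.contains i then (st.1 + 1, st.2.insert i (st.1 + 1)) else st) (j, d)).1
        = j + ((l.filter (fun i => res.contains i)).length : Int) ∧
      (l.foldl (fun (st : Int × PySem.Dict Int Int) i =>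
          if res.contains i then (st.1 + 1, st.2.insert i (st.1 + 1)) else st) (j, d)).2.items
        = d.items ++ (PySem.List.enumerate (l.filter (fun i => res.contains i)) (j + 1)).map
            (fun q => (q.2, q.1)) := by
  intro l
  induction l with
  | nil => intro j d _ _; simp
  | cons a t ih =>
    intro j d hnd hfresh
    have hnd' : t.Nodup := hnd.of_cons
    have hna : a ∉ t := (List.nodup_cons.mp hnd).1
    by_cases hm : a ∈ res
    · have hc : res.contains a = true := by simpa using hm
      have hfresh' : ∀ i ∈ t, (d.insert a (j + 1)).contains i = false := by
        intro i hi
        rw [PySem.Dict.contains_insert]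
        have : (i == a) = false := by
          simp only [beq_eq_false_iff_ne]; rintro rfl; exact hna hi
        simp [this, hfresh i (List.mem_cons_of_mem _ hi)]
      have := ih (j + 1) (d.insert a (j + 1)) hnd' hfresh'
      simp only [List.foldl_cons, hc, if_true, List.filter_cons] at *
      constructor
      · rw [this.1, List.length_cons]; push_cast; ring
      · rw [this.2, PySem.Dict.items_insert_of_not_contains d (j + 1)
              (by simpa using hfresh a (List.mem_cons_self))]
        simp [PySem.List.enumerate_cons]
    · have hcf : res.contains a = false := by simpa using hm
      have := ih j d hnd' (fun i hi => hfresh i (List.mem_cons_of_mem _ hi))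
      simp only [List.foldl_cons, hcf, if_false, Bool.false_eq_true,
        List.filter_cons] at *
      exact this

-- The range scan's surviving positions are exactly the sorted in-range resolved positions.
theorem filtered_range_eq_sorted (L : Int) (res : List Int) (hnd : res.Nodup) :
    (PySem.List.pyRange 1 (L + 1) 1).filter (fun i => res.contains i)
      = PySem.List.sorted (res.filter (fun p => decide (1 ≤ p ∧ p ≤ L))) (fun x => x) false := by
  set F := (PySem.List.pyRange 1 (L + 1) 1).filter (fun i => res.contains i) with hF
  have hpw : F.Pairwise (· < ·) :=
    List.Pairwise.filter _ (PySem.List.pairwise_lt_pyRange_one 1 (L + 1))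
  have hndF : F.Nodup := hpw.imp (fun h => ne_of_lt h)
  have hndG : (res.filter (fun p => decide (1 ≤ p ∧ p ≤ L))).Nodup := hnd.filter _
  have hperm : F.Perm (res.filter (fun p => decide (1 ≤ p ∧ p ≤ L))) := by
    refine List.perm_of_nodup_nodup_toFinset_eq hndF hndG ?_
    ext x
    simp only [List.mem_toFinset, hF, List.mem_filter, PySem.List.mem_pyRange_one,
      List.contains_iff_mem, decide_eq_true_eq]
    constructor
    · rintro ⟨⟨h1, h2⟩, hmem⟩; exact ⟨hmem, h1, by omega⟩
    · rintro ⟨hmem, h1, h2⟩; exact ⟨⟨h1, by omega⟩, hmem⟩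
  exact (PySem.List.sorted_eq_of_perm_of_pairwise_lt _ F _ hperm hpw).symm

-- ===== VERDICT (by name: the statement is the Claim_ definition above) =====
theorem build_resolved_index_map_spec : Claim_equal_build_resolved_index_map := by
  intro L res _ hpre
  unfold Spec_build_resolved_index_map build_resolved_index_map build_resolved_index_map_alt
  have h := loopA_invariant res (PySem.List.pyRange 1 (L + 1) 1) 0 PySem.Dict.empty
    (PySem.List.nodup_pyRange_one 1 (L + 1)) (by intro i _; rfl)
  simp only [h.2, filtered_range_eq_sorted L res hpre]
  norm_num
  rfl
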